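-- pv_equiv track=rewrite | github.com/MetaMarius/EEG_Analysis | functions/result_file_functions.py | combine_trials_and_uso_ids
-- ===== SOURCE A (Python) =====
-- def combine_trials_and_uso_ids(trials_con, uso_ids_con):
--     combination = {participant: [] for participant in trials_con}
--     for participant in uso_ids_con:
--         for index in uso_ids_con[participant]:
--             combination[participant].append(index[0])
--     for participant in combination:
--         for idx, dictionary in enumerate(combination[participant]):
--             dictionary.update({'condition': trials_con[participant][idx]})
--     return combination
-- ===== SOURCE B (Python) =====
-- def combine_trials_and_uso_ids(trials_con, uso_ids_con):
--     # Build each participant's stamped row directly from their uso entries,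
--     # consuming that participant's condition labels from an iterator (the
--     # label is written into the entry's leading dict in place, like the
--     # original), then assemble the result over trials_con's participants.
--     # No accumulator dict mutated across passes, no positional index
--     # arithmetic, no separate annotate pass.
--     def stamp(entry, labels):
--         d = entry[0]
--         d['condition'] = next(labels)
--         return d
--     def row(p, entries):
--         labels = iter(trials_con[p])
--         return [stamp(e, labels) for e in entries]
--     rows = {p: row(p, entries) for p, entries in uso_ids_con.items() if entries}
--     return {p: rows.get(p, []) for p in trials_con}
-- ===== Notes on version B (the rewrite author's own statement) =====
-- stated objective: alternative
-- what changed: A's three phases (key-initialising comprehension, an append pass collecting index[0] into an accumulator dict, then a second enumerate pass patching 'condition' in by positional index) are replaced by building each participant's stamped row directly from their uso entries while consuming that participant's labels from an iterator, then assembling the result over trials_con's keys; the mutated accumulator, the intermediate unstamped lists and all index arithmetic disappear.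
import Mathlib
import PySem

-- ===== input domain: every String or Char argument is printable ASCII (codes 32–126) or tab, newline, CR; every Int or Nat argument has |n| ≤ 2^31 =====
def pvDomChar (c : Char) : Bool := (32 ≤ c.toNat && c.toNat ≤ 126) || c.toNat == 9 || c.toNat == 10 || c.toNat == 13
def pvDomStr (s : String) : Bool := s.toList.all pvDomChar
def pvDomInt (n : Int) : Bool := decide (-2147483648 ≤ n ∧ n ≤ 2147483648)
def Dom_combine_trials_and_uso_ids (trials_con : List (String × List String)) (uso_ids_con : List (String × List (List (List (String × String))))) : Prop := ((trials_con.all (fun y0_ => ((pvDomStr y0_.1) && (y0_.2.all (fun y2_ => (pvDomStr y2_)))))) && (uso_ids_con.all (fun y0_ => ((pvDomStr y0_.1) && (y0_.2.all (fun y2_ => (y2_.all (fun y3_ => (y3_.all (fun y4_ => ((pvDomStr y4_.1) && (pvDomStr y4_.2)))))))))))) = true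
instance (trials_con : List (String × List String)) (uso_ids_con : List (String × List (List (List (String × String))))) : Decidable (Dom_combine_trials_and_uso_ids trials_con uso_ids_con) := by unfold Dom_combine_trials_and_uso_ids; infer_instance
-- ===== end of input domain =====

-- B replaces A's accumulator dict + append pass + enumerate-update pass by building each
-- participant's stamped row directly (labels consumed from an iterator, no index arithmetic)
-- and assembling the result over trials_con's keys (simpler decomposition); both programs
-- mutate the inner dicts of uso_ids_con in place — the theorems here are about the return value.

-- ===== PORT A =====
def combine_trials_and_uso_ids (trials_con : List (String × List String)) (uso_ids_con : List (String × List (List (List (String × String))))) : List (String × List (List (String × String))) :=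
  let T : PySem.Dict String (List String) := PySem.Dict.ofList trials_con
  let U : PySem.Dict String (List (List (List (String × String)))) := PySem.Dict.ofList uso_ids_con
  let combination : PySem.Dict String (List (List (String × String))) :=
    T.keys.foldl (fun d p => d.insert p []) PySem.Dict.empty
  let combination := U.items.foldl (fun d pv =>
    pv.2.foldl (fun d idx =>
      d.modify pv.1 [] (fun l => l ++ [(PySem.List.pyGet? idx 0).getD []])) d) combination
  combination.items.map (fun pl => (pl.1,
    (PySem.List.enumerate pl.2).map (fun id =>
      ((PySem.Dict.mk id.2).insert "condition" ((PySem.List.pyGet? (T.getD pl.1 []) id.1).getD "")).items)))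

-- ===== PORT B =====
-- Source B's `row`: walk the entries, consuming one label per entry from the label iterator and
-- stamping it into the entry's leading dict; Python raises StopIteration when labels run out
-- (excluded by Pre_), ported as returning the list built so far.
def pvRow (entries : List (List (List (String × String)))) (labels : List String) : List (List (String × String)) :=
  match entries, labels with
  | [], _ => []
  | _ :: _, [] => []
  | e :: es, l :: ls =>
      ((PySem.Dict.mk ((PySem.List.pyGet? e 0).getD [])).insert "condition" l).items :: pvRow es ls

def combine_trials_and_uso_ids_alt (trials_con : List (String × List String)) (uso_ids_con : List (String × List (List (List (String × String))))) : List (String × List (List (String × String))) :=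
  let T : PySem.Dict String (List String) := PySem.Dict.ofList trials_con
  let U : PySem.Dict String (List (List (List (String × String)))) := PySem.Dict.ofList uso_ids_con
  let rows : PySem.Dict String (List (List (String × String))) :=
    (U.items.filter (fun pv => !pv.2.isEmpty)).foldl
      (fun d pv => d.insert pv.1 (pvRow pv.2 (T.getD pv.1 []))) PySem.Dict.empty
  T.keys.map (fun p => (p, rows.getD p []))

-- ===== PRECONDITION & SPEC =====
-- Pre_ excludes exactly the inputs on which Python A raises: a participant of uso_ids_con with a
-- nonempty entry list missing from trials_con (KeyError), an empty inner entry (IndexError on index[0]),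
-- or more uso entries than condition labels for a participant (IndexError on trials_con[participant][idx]).
def Pre_combine_trials_and_uso_ids (trials_con : List (String × List String)) (uso_ids_con : List (String × List (List (List (String × String))))) : Prop :=
  ∀ pv ∈ (PySem.Dict.ofList uso_ids_con).items,
    (pv.2 ≠ [] → pv.1 ∈ (PySem.Dict.ofList trials_con).keys) ∧
    (∀ idx ∈ pv.2, idx ≠ []) ∧
    pv.2.length ≤ ((PySem.Dict.ofList trials_con).getD pv.1 []).length

instance (trials_con : List (String × List String)) (uso_ids_con : List (String × List (List (List (String × String))))) : Decidable (Pre_combine_trials_and_uso_ids trials_con uso_ids_con) := by unfold Pre_combine_trials_and_uso_ids; infer_instance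

def pvWitness_combine_trials_and_uso_ids : (List (String × List String)) × (List (String × List (List (List (String × String))))) :=
  ([("p1", ["high", "low"]), ("p2", ["low"])],
   [("p1", [[[("uso_id", "3")]], [[("uso_id", "7")]]])])

def Spec_combine_trials_and_uso_ids (trials_con : List (String × List String)) (uso_ids_con : List (String × List (List (List (String × String))))) (out : List (String × List (List (String × String)))) : Prop := out = combine_trials_and_uso_ids_alt trials_con uso_ids_con
instance (trials_con : List (String × List String)) (uso_ids_con : List (String × List (List (List (String × String))))) (out : List (String × List (List (String × String)))) : Decidable (Spec_combine_trials_and_uso_ids trials_con uso_ids_con out) := by unfold Spec_combine_trials_and_uso_ids; infer_instance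

-- ===== CLAIM (what is proved, stated in full; the proofs are below) =====
def Claim_equal_combine_trials_and_uso_ids : Prop := ∀ (trials_con : List (String × List String)) (uso_ids_con : List (String × List (List (List (String × String))))), Dom_combine_trials_and_uso_ids trials_con uso_ids_con → Pre_combine_trials_and_uso_ids trials_con uso_ids_con → Spec_combine_trials_and_uso_ids trials_con uso_ids_con (combine_trials_and_uso_ids trials_con uso_ids_con)

-- ===== LEMMAS AND PROOFS =====

-- the inner append-to-one-key loop, seen through getD
theorem pv_inner_getD {β γ : Type} (f : β → γ)
    (v : List β) (d : PySem.Dict String (List γ)) (p c : String) :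
    (v.foldl (fun d idx => d.modify p [] (fun l => l ++ [f idx])) d).getD c []
      = if c = p then d.getD c [] ++ v.map f else d.getD c [] := by
  induction v generalizing d with
  | nil => simp
  | cons a v ih =>
    simp only [List.foldl_cons, ih, PySem.Dict.getD_modify, List.map_cons]
    split_ifs with h <;> simp [h]

theorem pv_inner_keys {β γ : Type} (f : β → γ)
    (v : List β) (d : PySem.Dict String (List γ)) (p : String) (hp : p ∈ d.keys) :
    (v.foldl (fun d idx => d.modify p [] (fun l => l ++ [f idx])) d).keys = d.keys := by
  induction v generalizing d with
  | nil => rfl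
  | cons a v ih =>
    have hc : d.contains p = true := (PySem.Dict.contains_iff_mem_keys _ _).2 hp
    rw [List.foldl_cons, ih, PySem.Dict.keys_modify, PySem.Dict.keys_insert_of_contains _ _ hc]
    rw [PySem.Dict.keys_modify, PySem.Dict.keys_insert_of_contains _ _ hc]
    exact hp

-- the outer loop over key/value pairs, through getD (e = the iterated list, h = the appended element)
theorem pv_outer_getD {α β γ : Type} (e : String × α → List β) (h : String × α → β → γ)
    (l : List (String × α)) (d : PySem.Dict String (List γ)) (c : String) :
    (l.foldl (fun d pv => (e pv).foldl (fun d x => d.modify pv.1 [] (fun a => a ++ [h pv x])) d) d).getD c []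
      = d.getD c [] ++ (l.filter (fun pv => pv.1 == c)).flatMap (fun pv => (e pv).map (h pv)) := by
  induction l generalizing d with
  | nil => simp
  | cons pv l ih =>
    rw [List.foldl_cons, ih, pv_inner_getD]
    by_cases hc : c = pv.1
    · simp [hc, List.filter_cons]
    · have : (pv.1 == c) = false := by
        simp only [beq_eq_false_iff_ne]
        exact fun e => hc e.symm
      simp [hc, List.filter_cons, this]

theorem pv_outer_keys {α β γ : Type} (e : String × α → List β) (h : String × α → β → γ)
    (l : List (String × α)) (d : PySem.Dict String (List γ))
    (hk : ∀ pv ∈ l, e pv ≠ [] → pv.1 ∈ d.keys) :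
    (l.foldl (fun d pv => (e pv).foldl (fun d x => d.modify pv.1 [] (fun a => a ++ [h pv x])) d) d).keys = d.keys := by
  induction l generalizing d with
  | nil => rfl
  | cons pv l ih =>
    by_cases hne : e pv = []
    · rw [List.foldl_cons, hne]
      exact ih d (fun q hq => hk q (by simp [hq]))
    · rw [List.foldl_cons, ih, pv_inner_keys]
      · exact hk pv (by simp) hne
      · intro q hq
        rw [pv_inner_keys _ _ _ _ (hk pv (by simp) hne)]
        exact hk q (by simp [hq])

theorem pv_filter_key_of_mem {α : Type} {l : List (String × α)} {c : String} {v : α}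
    (hnd : (l.map Prod.fst).Nodup) (hv : (c, v) ∈ l) :
    l.filter (fun pv => pv.1 == c) = [(c, v)] := by
  induction l with
  | nil => simp at hv
  | cons a l ih =>
    simp only [List.map_cons, List.nodup_cons] at hnd
    rcases List.mem_cons.1 hv with h | h
    · subst h
      have : List.filter (fun pv => pv.1 == c) l = [] := by
        rw [List.filter_eq_nil_iff]
        intro x hx
        simp only [beq_iff_eq]
        intro e
        exact hnd.1 (by simpa [e] using List.mem_map_of_mem (f := Prod.fst) hx)
      simp [List.filter_cons, this]
    · have hne : (a.1 == c) = false := by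
        simp only [beq_eq_false_iff_ne]
        intro e
        refine hnd.1 ?_
        have hm : c ∈ List.map Prod.fst l := List.mem_map_of_mem (f := Prod.fst) h
        simpa [e] using hm
      simp [List.filter_cons, hne, ih hnd.2 h]

theorem pv_filter_key_of_not_mem {α : Type} {l : List (String × α)} {c : String}
    (h : c ∉ l.map Prod.fst) :
    l.filter (fun pv => pv.1 == c) = [] := by
  rw [List.filter_eq_nil_iff]
  intro pv hpv
  simp only [beq_iff_eq]
  intro e
  exact h (e ▸ List.mem_map_of_mem (f := Prod.fst) hpv)

-- enumerate commutes with map on the values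
theorem pv_enumerate_map {α β : Type} (f : α → β) (xs : List α) (s : Int) :
    PySem.List.enumerate (xs.map f) s = (PySem.List.enumerate xs s).map (fun q => (q.1, f q.2)) := by
  induction xs generalizing s with
  | nil => simp [PySem.List.enumerate_nil]
  | cons a xs ih => simp [PySem.List.enumerate_cons, ih]

-- A's enumerate-and-index-into-ys traversal equals the zip traversal when ys is long enough
theorem pv_enum_zip {α β γ : Type} (g : α → β → γ) (dflt : β) :
    ∀ (xs : List α) (ys : List β) (s : Nat), s + xs.length ≤ ys.length →
    (PySem.List.enumerate xs (s : Int)).map (fun q => g q.2 ((PySem.List.pyGet? ys q.1).getD dflt))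
      = (xs.zip (ys.drop s)).map (fun q => g q.1 q.2) := by
  intro xs
  induction xs with
  | nil => intro ys s _; simp [PySem.List.enumerate_nil]
  | cons a xs ih =>
    intro ys s hlen
    simp only [List.length_cons] at hlen
    have hs : s < ys.length := by omega
    have hdrop : ys.drop s = ys[s] :: ys.drop (s + 1) := List.drop_eq_getElem_cons hs
    have hih := ih ys (s + 1) (by omega)
    rw [PySem.List.enumerate_cons, List.map_cons, hdrop, List.zip_cons_cons, List.map_cons]
    refine congrArg₂ List.cons ?_ ?_
    · simp [List.getElem?_eq_getElem hs]
    · have : ((s : Int) + 1) = ((s + 1 : Nat) : Int) := by push_cast; ring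
      rw [this, hih]

-- pvRow truncates exactly like zip
theorem pv_row_eq_zip (entries : List (List (List (String × String)))) (labels : List String) :
    pvRow entries labels
      = (entries.zip labels).map (fun el =>
          ((PySem.Dict.mk ((PySem.List.pyGet? el.1 0).getD [])).insert "condition" el.2).items) := by
  induction entries generalizing labels with
  | nil => simp [pvRow]
  | cons e es ih =>
    cases labels with
    | nil => simp [pvRow]
    | cons l ls => simp [pvRow, ih]

theorem pv_main (trials_con : List (String × List String)) (uso_ids_con : List (String × List (List (List (String × String)))))
    (pre : Pre_combine_trials_and_uso_ids trials_con uso_ids_con) :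
    combine_trials_and_uso_ids trials_con uso_ids_con = combine_trials_and_uso_ids_alt trials_con uso_ids_con := by
  unfold Pre_combine_trials_and_uso_ids at pre
  set T : PySem.Dict String (List String) := PySem.Dict.ofList trials_con with hT
  set U : PySem.Dict String (List (List (List (String × String)))) := PySem.Dict.ofList uso_ids_con with hU
  have hTn : T.keys.Nodup := PySem.Dict.nodup_keys_ofList trials_con
  have hUn : U.keys.Nodup := PySem.Dict.nodup_keys_ofList uso_ids_con
  set C0 : PySem.Dict String (List (List (String × String))) :=
    List.foldl (fun d p => d.insert p []) PySem.Dict.empty T.keys with hC0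
  have hC0items : C0.items = T.keys.map (fun p => (p, ([] : List (List (String × String))))) := by
    have := PySem.Dict.items_foldl_insert_fresh T.keys (fun p => p) (fun _ => ([] : List (List (String × String)))) PySem.Dict.empty
      (by intro a _; exact PySem.Dict.contains_empty a) (by simpa using hTn)
    simpa using this
  have hC0keys : C0.keys = T.keys := by
    simp [PySem.Dict.keys, hC0items]
  have hC0getD : ∀ p, C0.getD p [] = [] := by
    intro p
    by_cases hp : p ∈ T.keys
    · exact PySem.Dict.getD_of_mem_items C0 (by rw [hC0items]; exact List.mem_map_of_mem hp) (hC0keys ▸ hTn) []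
    · rw [PySem.Dict.getD_eq_get?_getD, (PySem.Dict.get?_eq_none_iff_not_mem_keys _ _).2 (hC0keys ▸ hp)]
      rfl
  have hpre1 : ∀ pv ∈ U.items, pv.2 ≠ [] → pv.1 ∈ C0.keys := by
    intro pv hpv hne
    rw [hC0keys]
    exact (pre pv hpv).1 hne
  -- the value A's loop stores at a key p equals the contribution of U.getD p []
  have hUval : ∀ {β : Type} (e : String × List (List (List (String × String))) → List β)
      (h : String × List (List (List (String × String))) → β → List (String × String))
      (he : ∀ p, e (p, []) = []) (p : String),
      (U.items.filter (fun pv => pv.1 == p)).flatMap (fun pv => (e pv).map (h pv))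
        = (e (p, U.getD p [])).map (h (p, U.getD p [])) := by
    intro β e h he p
    by_cases hp : p ∈ U.keys
    · obtain ⟨pv, hpv, hfst⟩ := List.mem_map.1 hp
      obtain ⟨c, v⟩ := pv
      cases hfst
      rw [pv_filter_key_of_mem hUn hpv, PySem.Dict.getD_of_mem_items U hpv hUn]
      simp
    · rw [pv_filter_key_of_not_mem hp,
        PySem.Dict.getD_eq_get?_getD, (PySem.Dict.get?_eq_none_iff_not_mem_keys _ _).2 hp]
      simp [he]
  -- each key's uso list is at most as long as its label list
  have hlen : ∀ p, (U.getD p []).length ≤ (T.getD p []).length := by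
    intro p
    by_cases hp : p ∈ U.keys
    · obtain ⟨pv, hpv, hfst⟩ := List.mem_map.1 hp
      obtain ⟨c, v⟩ := pv
      cases hfst
      rw [PySem.Dict.getD_of_mem_items U hpv hUn]
      exact (pre _ hpv).2.2
    · rw [PySem.Dict.getD_eq_get?_getD (d := U), (PySem.Dict.get?_eq_none_iff_not_mem_keys _ _).2 hp]
      simp
  -- closed form of the A side
  have hA : combine_trials_and_uso_ids trials_con uso_ids_con
      = T.keys.map (fun p => (p,
          (PySem.List.enumerate ((U.getD p []).map (fun idx => (PySem.List.pyGet? idx 0).getD []))).map (fun id =>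
            ((PySem.Dict.mk id.2).insert "condition" ((PySem.List.pyGet? (T.getD p []) id.1).getD "")).items))) := by
    unfold combine_trials_and_uso_ids
    dsimp only
    rw [← hC0]
    set C1 := List.foldl (fun d pv =>
      List.foldl (fun d idx =>
        d.modify pv.1 [] (fun l => l ++ [(PySem.List.pyGet? idx 0).getD []])) d pv.2) C0 U.items with hC1
    have hkeys : C1.keys = T.keys := by
      rw [hC1, pv_outer_keys (fun pv => pv.2) (fun _ idx => (PySem.List.pyGet? idx 0).getD []) _ _ hpre1, hC0keys]
    have hitems : C1.items = T.keys.map (fun p =>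
        (p, (U.getD p []).map (fun idx => (PySem.List.pyGet? idx 0).getD []))) := by
      rw [PySem.Dict.items_eq_map_keys C1 (hkeys ▸ hTn) [], hkeys]
      refine List.map_congr_left (fun p _ => ?_)
      rw [hC1, pv_outer_getD (fun pv => pv.2) (fun _ idx => (PySem.List.pyGet? idx 0).getD []),
        hC0getD, List.nil_append,
        hUval (fun pv => pv.2) (fun _ idx => (PySem.List.pyGet? idx 0).getD []) (fun _ => rfl) p]
    rw [hitems, List.map_map]
    rfl
  rw [hA]
  unfold combine_trials_and_uso_ids_alt
  dsimp only
  rw [← hT, ← hU]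
  set F := U.items.filter (fun pv => !pv.2.isEmpty) with hF
  set rows : PySem.Dict String (List (List (String × String))) :=
    F.foldl (fun d pv => d.insert pv.1 (pvRow pv.2 (T.getD pv.1 []))) PySem.Dict.empty with hrowsdef
  have hFnd : (F.map Prod.fst).Nodup :=
    hUn.sublist (List.filter_sublist.map Prod.fst)
  have hritems : rows.items = F.map (fun pv => (pv.1, pvRow pv.2 (T.getD pv.1 []))) := by
    have := PySem.Dict.items_foldl_insert_fresh F (fun pv => pv.1)
      (fun pv => pvRow pv.2 (T.getD pv.1 []))
      (PySem.Dict.empty : PySem.Dict String (List (List (String × String))))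
      (by intro a _; exact PySem.Dict.contains_empty a.1) (by simpa using hFnd)
    simpa using this
  have hrkeys : rows.keys = F.map Prod.fst := by
    simp [PySem.Dict.keys, hritems, Function.comp]
  have hrows : ∀ p, rows.getD p [] = pvRow (U.getD p []) (T.getD p []) := by
    intro p
    by_cases hp : p ∈ U.keys
    · obtain ⟨pv0, hpv0, hfst⟩ := List.mem_map.1 hp
      obtain ⟨v, hpv⟩ : ∃ v, (p, v) ∈ U.items := ⟨pv0.2, by rw [← hfst]; exact hpv0⟩
      rw [PySem.Dict.getD_of_mem_items U hpv hUn]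
      by_cases hv : v = []
      · subst hv
        have hnk : p ∉ rows.keys := by
          rw [hrkeys]
          intro hmem
          obtain ⟨qv, hqv, hq1⟩ := List.mem_map.1 hmem
          have hqU : qv ∈ U.items := List.mem_of_mem_filter hqv
          have : qv ∈ U.items.filter (fun r => r.1 == p) := by
            rw [List.mem_filter]
            exact ⟨hqU, by simpa using hq1⟩
          rw [pv_filter_key_of_mem hUn hpv] at this
          have hq2 : qv.2 = ([] : List (List (List (String × String)))) := by
            cases List.mem_singleton.1 this; rfl
          have hqf := (List.mem_filter.1 hqv).2
          rw [hq2] at hqf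
          simp at hqf
        rw [PySem.Dict.getD_eq_get?_getD,
          (PySem.Dict.get?_eq_none_iff_not_mem_keys _ _).2 hnk]
        rfl
      · have hmemF : (p, v) ∈ F := by
          rw [hF, List.mem_filter]
          exact ⟨hpv, by simpa using hv⟩
        have hmemI : (p, pvRow v (T.getD p [])) ∈ rows.items := by
          rw [hritems]
          exact List.mem_map_of_mem hmemF
        exact PySem.Dict.getD_of_mem_items rows hmemI (by rw [PySem.Dict.keys, hritems]; simpa [Function.comp] using hFnd) []
    · have hU0 : U.getD p [] = [] := by
        rw [PySem.Dict.getD_eq_get?_getD,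
          (PySem.Dict.get?_eq_none_iff_not_mem_keys _ _).2 hp]
        rfl
      have hnk : p ∉ rows.keys := by
        rw [hrkeys]
        intro hmem
        obtain ⟨qv, hqv, hq1⟩ := List.mem_map.1 hmem
        exact hp (hq1 ▸ List.mem_map_of_mem (f := Prod.fst) (List.mem_of_mem_filter hqv))
      rw [hU0, PySem.Dict.getD_eq_get?_getD,
        (PySem.Dict.get?_eq_none_iff_not_mem_keys _ _).2 hnk]
      rfl
  refine List.map_congr_left (fun p _ => ?_)
  refine congrArg (Prod.mk p) ?_
  rw [hrows p, pv_row_eq_zip, pv_enumerate_map, List.map_map]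
  have := pv_enum_zip
    (fun (e : List (List (String × String))) (y : String) =>
      ((PySem.Dict.mk ((PySem.List.pyGet? e 0).getD [])).insert "condition" y).items)
    "" (U.getD p []) (T.getD p []) 0 (by simpa using hlen p)
  simpa using this

-- ===== VERDICT (by name: the statement is the Claim_ definition above) =====
theorem combine_trials_and_uso_ids_spec : Claim_equal_combine_trials_and_uso_ids := by
  intro trials_con uso_ids_con _dom pre
  exact pv_main trials_con uso_ids_con pre
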